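-- pv_equiv track=rewrite | github.com/cholmes/mapstory | watchdog/logs.py | log_sections
-- ===== SOURCE A (Python) =====
-- LEVELS = set(['INFO', 'WARN', 'DEBUG', 'ERROR'])
--
-- def is_logger_line(line):
--     return any([(' %s ' % level) in line
--                 for level in LEVELS])
--
-- def log_sections(fileobj):
--     sections = []
--     next_section = []
--     for line in fileobj:
--         if is_logger_line(line):
--             if next_section:
--                 sections.append(next_section)
--             next_section = [line]
--         else:
--             next_section.append(line)
--     if next_section:
--         sections.append(next_section)
--     return sections
-- ===== SOURCE B (Python) =====
-- LEVELS = set(['INFO', 'WARN', 'DEBUG', 'ERROR'])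
--
-- def is_logger_line(line):
--     return any([(' %s ' % level) in line
--                 for level in LEVELS])
--
-- def log_sections(fileobj):
--     lines = list(fileobj)
--     n = len(lines)
--     sections = []
--     i = 0
--     while i < n:
--         j = i + 1
--         while j < n and not is_logger_line(lines[j]):
--             j += 1
--         sections.append(lines[i:j])
--         i = j
--     return sections
-- ===== Notes on version B (the rewrite author's own statement) =====
-- stated objective: alternative
-- what changed: A streams lines through a fold that grows the current section line by line in an accumulator pair; B materialises the list, finds each section boundary with an index scan and emits every section as a single slice lines[i:j].
import Mathlib
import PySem

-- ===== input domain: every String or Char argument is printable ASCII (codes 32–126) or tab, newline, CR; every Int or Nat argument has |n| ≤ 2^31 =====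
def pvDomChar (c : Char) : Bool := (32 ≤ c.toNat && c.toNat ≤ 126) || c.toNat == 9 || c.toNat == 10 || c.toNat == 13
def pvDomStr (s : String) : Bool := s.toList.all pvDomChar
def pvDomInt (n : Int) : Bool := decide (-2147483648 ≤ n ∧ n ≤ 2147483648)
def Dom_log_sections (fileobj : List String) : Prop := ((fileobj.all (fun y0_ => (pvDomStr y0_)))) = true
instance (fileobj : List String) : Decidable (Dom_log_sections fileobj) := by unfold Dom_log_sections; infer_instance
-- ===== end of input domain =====

-- B replaces A's fold-with-accumulator by boundary scanning + slicing; objective: alternative decomposition (same O(n) cost).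

-- ===== PORT A =====
def LEVELS : List String := PySem.Set.ofList ["INFO", "WARN", "DEBUG", "ERROR"]

def is_logger_line (line : String) : Bool :=
  ((LEVELS.map (fun level => PySem.Str.isIn (" " ++ level ++ " ") line)).any id)

def log_sections (fileobj : List String) : List (List String) :=
  let st := fileobj.foldl
    (fun (st : List (List String) × List String) line =>
      if is_logger_line line then
        ((if st.2.isEmpty then st.1 else st.1 ++ [st.2]), [line])
      else
        (st.1, st.2 ++ [line]))
    ([], [])
  if st.2.isEmpty then st.1 else st.1 ++ [st.2]

-- ===== PORT B =====
-- inner 'while j < n and not is_logger_line(lines[j]): j += 1'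
def bAdvance (lines : List String) (j : Nat) : Nat :=
  if h : j < lines.length then
    if is_logger_line lines[j] then j else bAdvance lines (j + 1)
  else j
termination_by lines.length - j

theorem le_bAdvance (lines : List String) (j : Nat) : j ≤ bAdvance lines j := by
  fun_induction bAdvance lines j with
  | case1 => omega
  | case2 _ _ _ ih => omega
  | case3 => omega

-- outer 'while i < n: … sections.append(lines[i:j]); i = j'
def bLoop (lines : List String) (i : Nat) : List (List String) :=
  if h : i < lines.length then
    let j := bAdvance lines (i + 1)
    PySem.List.slice lines (some (i : Int)) (some (j : Int)) :: bLoop lines j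
  else []
termination_by lines.length - i
decreasing_by
  have := le_bAdvance lines (i + 1)
  omega

def log_sections_alt (fileobj : List String) : List (List String) :=
  bLoop fileobj 0

-- ===== PRECONDITION & SPEC =====
def Spec_log_sections (fileobj : List String) (out : List (List String)) : Prop := out = log_sections_alt fileobj
instance (fileobj : List String) (out : List (List String)) : Decidable (Spec_log_sections fileobj out) := by unfold Spec_log_sections; infer_instance

-- ===== CLAIM (what is proved, stated in full; the proofs are below) =====
def Claim_equal_log_sections : Prop := ∀ (fileobj : List String), Dom_log_sections fileobj → Spec_log_sections fileobj (log_sections fileobj)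

-- ===== LEMMAS AND PROOFS =====

-- the common shape: a section is one line plus the following non-logger lines
def specGo : List String → List (List String)
  | [] => []
  | l :: ls =>
    (l :: ls.takeWhile (fun x => !is_logger_line x)) ::
      specGo (ls.dropWhile (fun x => !is_logger_line x))
termination_by l => l.length
decreasing_by simpa using Nat.lt_succ_of_le (ls.dropWhile_sublist _).length_le

theorem specGo_nil : specGo [] = [] := by simp [specGo]

theorem specGo_cons (l : String) (ls : List String) :
    specGo (l :: ls) = (l :: ls.takeWhile (fun x => !is_logger_line x)) ::
      specGo (ls.dropWhile (fun x => !is_logger_line x)) := by rw [specGo]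

def stepA (st : List (List String) × List String) (line : String) : List (List String) × List String :=
  if is_logger_line line then
    ((if st.2.isEmpty then st.1 else st.1 ++ [st.2]), [line])
  else
    (st.1, st.2 ++ [line])

def finishA (st : List (List String) × List String) : List (List String) :=
  if st.2.isEmpty then st.1 else st.1 ++ [st.2]

theorem log_sections_eq_finishA (fileobj : List String) :
    log_sections fileobj = finishA (fileobj.foldl stepA ([], [])) := rfl

theorem foldA_eq (ls : List String) :
    ∀ (secs : List (List String)) (cur : List String), cur ≠ [] →
    finishA (ls.foldl stepA (secs, cur)) =
      secs ++ (cur ++ ls.takeWhile (fun x => !is_logger_line x)) ::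
        specGo (ls.dropWhile (fun x => !is_logger_line x)) := by
  induction ls with
  | nil =>
    intro secs cur hcur
    simp [finishA, specGo_nil, List.isEmpty_iff, hcur]
  | cons l ls ih =>
    intro secs cur hcur
    by_cases hl : is_logger_line l
    · have hstep : stepA (secs, cur) l = (secs ++ [cur], [l]) := by
        simp [stepA, hl, List.isEmpty_iff, hcur]
      rw [List.foldl_cons, hstep, ih (secs ++ [cur]) [l] (by simp)]
      simp [hl, specGo_cons]
    · have hstep : stepA (secs, cur) l = (secs, cur ++ [l]) := by
        simp [stepA, hl]
      rw [List.foldl_cons, hstep, ih secs (cur ++ [l]) (by simp)]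
      simp [hl]

theorem log_sections_eq_specGo (fileobj : List String) :
    log_sections fileobj = specGo fileobj := by
  rw [log_sections_eq_finishA]
  cases fileobj with
  | nil => simp [finishA, specGo_nil]
  | cons l ls =>
    have hfirst : stepA ([], []) l = ([], [l]) := by
      by_cases hl : is_logger_line l <;> simp [stepA, hl]
    rw [List.foldl_cons, hfirst, foldA_eq ls [] [l] (by simp)]
    rw [specGo_cons]
    simp

theorem take_takeWhile_length {α : Type} (p : α → Bool) (l : List α) :
    l.take (l.takeWhile p).length = l.takeWhile p := by
  induction l with
  | nil => simp
  | cons x xs ih =>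
    by_cases hx : p x <;> simp [hx, ih]

theorem drop_takeWhile_length {α : Type} (p : α → Bool) (l : List α) :
    l.drop (l.takeWhile p).length = l.dropWhile p := by
  induction l with
  | nil => simp
  | cons x xs ih =>
    by_cases hx : p x <;> simp [hx, ih]

theorem bAdvance_eq (lines : List String) (j : Nat) :
    bAdvance lines j =
      j + ((lines.drop j).takeWhile (fun x => !is_logger_line x)).length := by
  fun_induction bAdvance lines j with
  | case1 j h hl =>
    rw [List.drop_eq_getElem_cons h]
    simp [hl]
  | case2 j h hl ih =>
    rw [List.drop_eq_getElem_cons h, ih, List.takeWhile_cons]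
    simp [hl]
    omega
  | case3 j h =>
    rw [List.drop_eq_nil_of_le (by omega)]
    simp

theorem bLoop_eq (lines : List String) (i : Nat) :
    bLoop lines i = specGo (lines.drop i) := by
  fun_induction bLoop lines i with
  | case1 i h j ih =>
    have hdrop := List.drop_eq_getElem_cons h
    have hadv := bAdvance_eq lines (i + 1)
    set q : String → Bool := fun x => !is_logger_line x with hq
    set t := ((lines.drop (i + 1)).takeWhile q).length with ht
    have hslice : PySem.List.slice lines (some (i : Int)) (some ((bAdvance lines (i + 1)) : Int))
        = lines[i] :: (lines.drop (i + 1)).takeWhile q := by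
      rw [PySem.List.slice_natCast, hadv]
      have : i + 1 + t - i = t + 1 := by omega
      rw [this, hdrop, List.take_succ_cons, take_takeWhile_length]
    have hrest : lines.drop (bAdvance lines (i + 1)) = (lines.drop (i + 1)).dropWhile q := by
      rw [← drop_takeWhile_length q (lines.drop (i + 1)), List.drop_drop, hadv, ← ht]
    rw [hslice, ih, hrest, hdrop, specGo_cons]
  | case2 i h =>
    rw [List.drop_eq_nil_of_le (by omega)]
    exact specGo_nil.symm

-- ===== VERDICT (by name: the statement is the Claim_ definition above) =====
theorem log_sections_spec : Claim_equal_log_sections := by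
  intro fileobj _
  unfold Spec_log_sections
  rw [log_sections_eq_specGo, log_sections_alt, bLoop_eq, List.drop_zero]
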